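/- GENERATED by mk_final_copies.py from the proof of the farm's unit `decode_residue.1a` (farm:decode_residue.1a.1: Lemmas.lean) as the
   re-elaboration sweep compiled it — do not edit. -/
import Asan.CheckWalk
import Vorbis.Spec.Units.decode_residue_1a

/-!
  Lemmas of the proof unit `decode_residue.1a` (0x10ec00 – 0x10ec90): the prologue's three shadow stores as `storesMem` of the
  protected frame's layout, the shadow layer after the prologue, and the walk from the function's entry to `ret1` (0x10ec95) with
  the assertion `At1b` of Vorbis/Spec/DecodeResidue1.lean. (From the farm worker of `decode_residue.1`, attempt 1: its `phase1`.)
-/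

open X86 X86.User Asan Vorbis Vorbis.Spec Vorbis.Spec.DecodeResidue

set_option maxRecDepth 4000
set_option maxHeartbeats 4000000

namespace Vorbis.Spec.decode_residue_1a

/-! ### The prologue's shadow stores -/

/-- The address of a prologue's shadow store, `(base >> 3) + 0xC00000 + k`, is the shadow address of granule `base / 8 + k`. -/
theorem dr1a_shadow_store_addr (sp : Word) (k : Nat) (hlo : 0x700000 + 848 ≤ sp.toNat) (hhi : sp.toNat + 8 ≤ 0x800000) :
    (sp - 152) >>> 3 + UInt64.ofNat (12582912 + k) = shadowAddr ((sp.toNat - 152) / 8 + k) := by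
  unfold shadowAddr
  apply UInt64.toNat_inj.mp
  have e1 : (sp - 152).toNat = sp.toNat - 152 := by
    have : (152 : Word) ≤ sp := by
      rw [UInt64.le_iff_toNat_le]
      show 152 ≤ sp.toNat
      omega
    rw [UInt64.toNat_sub_of_le _ _ this]
    rfl
  rw [UInt64.toNat_add, UInt64.toNat_shiftRight, e1, UInt64.toNat_ofNat', UInt64.toNat_ofNat']
  have e3 : (3 : UInt64).toNat % 64 = 3 := rfl
  rw [e3, Nat.shiftRight_eq_div_pow]
  omega

/-- The three inline shadow stores of the prologue (0x10ec6b, 0x10ec75, 0x10ec7f) are `storesMem` of the frame's layout. -/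
theorem prologue_stores (m : Mem) (sp : Word) (hlo : 0x700000 + 848 ≤ sp.toNat) (hhi : sp.toNat + 8 ≤ 0x800000) :
    ((m.writeLE ((sp - 152) >>> 3 + 12582912) 4 4059165169).writeLE ((sp - 152) >>> 3 + 12582916) 4 4060410353).writeLE
        ((sp - 152) >>> 3 + 12582920) 4 4092850948 =
      storesMem m ((sp.toNat - 152) / 8) Vorbis.Frames.decode_residue.prologue := by
  have a0 := dr1a_shadow_store_addr sp 0 hlo hhi
  have a4 := dr1a_shadow_store_addr sp 4 hlo hhi
  have a8 := dr1a_shadow_store_addr sp 8 hlo hhi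
  simp only [Nat.reduceAdd, UInt64.reduceOfNat] at a0 a4 a8
  unfold storesMem Vorbis.Frames.decode_residue
  simp only [List.foldl]
  rw [← a0, ← a4, ← a8]

/-- **The shadow layer after the prologue** (SH8 pair, `ShadowInv.prologue_ra`): the pushes and spills before the three shadow
stores went to the stack (`hun`), the three stores are the layout's prologue; afterwards the own frame is the innermost protected
frame and the stack is clean below `sp − 248` (the steady stack pointer). `sb` names
`base >> 3`, the value the prologue keeps in rax (an atom for `u_omega`). -/
theorem shadow_prologue {others : List Obj} {frames : List (Nat × FrameLayout)} {m0 m1 : Mem} {sp sb : Word}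
    (hsb : (sp - 152) >>> 3 = sb)
    (h : ShadowInv others frames (sp.toNat + 8) m0) (hun : ShadowUntouched m0 m1) (h8 : sp.toNat % 8 = 0)
    (hlo : 0x700000 + 848 ≤ sp.toNat) (hhi : sp.toNat + 8 ≤ 0x800000) :
    ShadowInv others ((sp.toNat - 152, Vorbis.Frames.decode_residue) :: frames) (sp.toNat - 248)
      (((m1.writeLE (sb + 12582912) 4 4059165169).writeLE (sb + 12582916) 4 4060410353).writeLE
        (sb + 12582920) 4 4092850948) := by
  subst hsb
  rw [prologue_stores m1 sp hlo hhi]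
  have h1 := h.untouched hun
  have h2 := h1.prologue_ra (top' := sp.toNat - 248) Vorbis.Frames.decode_residue_ok h8
    (by simp only [Vorbis.Frames.decode_residue]; omega) (by omega) (by omega)
  exact h2

/-- Every live object at the entry is live inside the function (the own frame's objects were added). -/
theorem live_sub_frames' (g : G) : ∀ o, o ∈ stackObjs g.frames ++ g.others → o ∈ stackObjs g.frames' ++ g.others := by
  intro o ho
  unfold G.frames'
  rw [stackObjs_cons]
  rcases List.mem_append.mp ho with h | h
  · exact List.mem_append_left _ (List.mem_append_right _ h)
  · exact List.mem_append_right _ h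

/-! ### Phase 1: the prologue (0x10ec00 – 0x10ec95) -/

/-- **Segment .1a**: from the function's entry to `ret1` (0x10ec95): six pushes, `sub rsp, 0xc8`, the spills, the frame header, the
three shadow stores of the protected frame (`shadow_prologue`), the check of `f->residue_config` (OB1: `*f` is live). -/
theorem prologue_walk {Lay : Layout} (hLay : Lay.hi = 0x1000000) {μ : Microarch} (hμ : UserX.MicroOK μ) {u₀ : State}
    (hcode : HasCodeNat Lay u₀ Vorbis.L.decode_residue.entry Vorbis.Code.code_decode_residue.nat Vorbis.L.decode_residue.size)
    (hld8 : Asan.SmallCheck Lay μ Vorbis.WayInv (Vorbis.CodeOK u₀) [.rax, .rcx, .rdx] 8 Vorbis.L.__asan_load8_noabort.entry)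
    (g : G) (hent : Entered u₀ g) :
    ReachVia Lay μ WayInv g.e (fun v => At1b u₀ g v) := by
  obtain ⟨e, hge⟩ : ∃ e, g.e = e := ⟨_, rfl⟩
  have he := hent.entry
  have hpre := hent.pre
  have hRA : g.RA = (e.reg .rsp).toNat := by
    unfold G.RA
    rw [hge]
  rw [hge] at he hpre ⊢
  v_entry he
  have hinv0 := hpre.shadow.inv
  -- `base >> 3` as an atom: the shadow addresses are `sb + 0xC00000 + k`
  obtain ⟨sb, hsbdef⟩ : ∃ sb : Word, (e.reg .rsp - 152) >>> 3 = sb := ⟨_, rfl⟩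
  have hsbv : sb.toNat = ((e.reg .rsp).toNat - 152) / 8 := by
    rw [← hsbdef]
    u_omega
  have hsb : 0xE0000 ≤ sb.toNat ∧ sb.toNat + 12 ≤ 0x100000 := by omega
  -- (the exact value is hidden from `u_omega`: with the division in its context `omega` gives up on the disjointness goals)
  have hsbP : PLift ((e.reg .rsp - 152) >>> 3 = sb ∧ sb.toNat = ((e.reg .rsp).toNat - 152) / 8) := ⟨⟨hsbdef, hsbv⟩⟩
  clear hsbdef hsbv
  u_walk hcode [hμ.vendor, hsbP.down.1] until [Vorbis.L.decode_residue.ret1] span [Vorbis.L.textLo, Vorbis.L.textHi] side (v_side)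
  · -- 0x10ec90: the check of `f->residue_config` (f + 456, 8 bytes): inside `*f`
    have hinvS : ShadowInv g.others (((e.reg .rsp).toNat - 152, Vorbis.Frames.decode_residue) :: g.frames)
        ((e.reg .rsp).toNat - 248) s_10ec90.mem := by
      rw [w_mem]
      refine ShadowInv.untouched (shadow_prologue (m1 := ?m1) hsbP.down.1 hinv0 ?hun1 he_align he_room he_top) ?hun2
      case hun2 =>
        unfold ShadowUntouched
        u_eqon
      case hun1 =>
        unfold ShadowUntouched
        u_eqon
    have hl : LiveIn g.others g.frames' (e.reg .rdi).toNat Off.sizeof.stb_vorbis :=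
      hpre.inv.hand.obj.mono (live_sub_frames' g)
    have hl' : LiveIn g.others (((e.reg .rsp).toNat - 152, Vorbis.Frames.decode_residue) :: g.frames)
        (e.reg .rdi).toNat Off.sizeof.stb_vorbis := by
      unfold G.frames' at hl
      rw [hRA] at hl
      exact hl
    have hob := hpre.env.ok.inside _ hpre.vorbis.obj
    simp only [vblock, voff] at hob
    simp only [voff] at hl'
    exact hl'.accSmall hinvS (Mem.EqOn.refl _ _ _) _ 8 (by decide) (by u_omega) (by u_omega)
  · -- 0x10ec95: the assertion
    refine ReachVia.done ?_
    have hinvP : ShadowInv g.others (((e.reg .rsp).toNat - 152, Vorbis.Frames.decode_residue) :: g.frames)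
        ((e.reg .rsp).toNat - 248) s_10ec90r.mem := by
      rw [w_mem]
      refine ShadowInv.untouched (shadow_prologue (m1 := ?m1) hsbP.down.1 hinv0 ?hun1 he_align he_room he_top) ?hun2
      case hun2 =>
        unfold ShadowUntouched
        u_eqon
      case hun1 =>
        unfold ShadowUntouched
        u_eqon
    refine ⟨w_rip, ?_, ?_, ?_, ?_, w_eq, ?abi, ?_, ?_, ?_, ?_, ?_, ?_, ?_, ?_, ?ch, ?n, ?_, ?si, ?same, ?shadow⟩
    case abi => v_inv
    case ch =>
      unfold G.ch
      rw [hge, ← toNat_part32]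
      u_resolve
      rw [toNat_part32]
      omega
    case n =>
      unfold G.n
      rw [hge, ← toNat_part32]
      u_resolve
      rw [toNat_part32]
      omega
    case si =>
      rw [hRA, hge, ← hsbP.down.2]
      u_resolve
    case same =>
      have hspan : shadowSpan ((e.reg .rsp).toNat - 152) ((e.reg .rsp).toNat - 56) =
          ⟨0xC00000 + sb.toNat, 0xC00000 + sb.toNat + 12⟩ := by
        have hv := hsbP.down.2
        unfold shadowSpan
        congr 1 <;> omega
      rw [hRA, hge, hspan]
      u_same
    case shadow =>
      unfold G.frames'
      rw [hRA]
      exact hinvP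
    all_goals rw [hge]
    all_goals first | (with_reducible assumption) | u_resolve

end Vorbis.Spec.decode_residue_1a
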